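-- pv_equiv track=rewrite | github.com/Ak-07-prog/Normalisation-Tool | normalization.py | determine_normal_form
-- ===== SOURCE A (Python) =====
-- def attribute_closure(attributes: set, fds: list):
--     """
--     Computes the closure of a set of attributes under the given FDs.
--     """
--     closure = attributes.copy()
--     changed = True
--     while changed:
--         changed = False
--         for lhs, rhs in fds:
--             if lhs.issubset(closure):
--                 if not rhs.issubset(closure):
--                     closure.update(rhs)
--                     changed = True
--     return closure
--
-- def determine_normal_form(relation_attrs, fds, candidate_keys):
--     """
--     Determines the highest normal form (1NF, 2NF, 3NF, BCNF) and explains violations.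
--     Returns (NormalFormString, ExplanationString, ViolatingFDs).
--     """
--     prime_attributes = set()
--     for key in candidate_keys:
--         prime_attributes.update(key)
--
--     violations_2nf = []
--     violations_3nf = []
--     violations_bcnf = []
--
--     for lhs, rhs in fds:
--         # Filter FDs to those relevant to this relation (LHS and RHS in relation_attrs)
--         if not lhs.issubset(relation_attrs) or not rhs.issubset(relation_attrs):
--             continue
--
--         clean_rhs = rhs - lhs
--         if not clean_rhs:
--             continue
--
--         # Check BCNF: LHS must be a superkey
--         # Note: We must check if LHS is a superkey *in this relation*.
--         # Computing closure using ALL fds, then checking if it covers relation_attrs.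
--         lhs_closure = attribute_closure(lhs, fds)
--         is_superkey = relation_attrs.issubset(lhs_closure)
--
--         if not is_superkey:
--             violations_bcnf.append((lhs, clean_rhs, "LHS is not a superkey"))
--
--             # Check 2NF
--             is_proper_subset_of_key = False
--             for key in candidate_keys:
--                 if lhs.issubset(key) and lhs != key:
--                     is_proper_subset_of_key = True
--                     break
--
--             non_prime_rhs = clean_rhs - prime_attributes
--
--             if is_proper_subset_of_key and non_prime_rhs:
--                  violations_2nf.append((lhs, non_prime_rhs, "Partial dependency"))
--
--             # Check 3NF
--             if not is_proper_subset_of_key: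
--                  if non_prime_rhs:
--                      violations_3nf.append((lhs, non_prime_rhs, "Transitive dependency"))
--
--     if violations_2nf:
--         return "1NF", "Violates 2NF (Partial Dependencies detected).", violations_2nf
--
--     if violations_3nf:
--         return "2NF", "Violates 3NF (Transitive Dependencies detected).", violations_3nf
--
--     if violations_bcnf:
--         return "3NF", "Violates BCNF (Dependencies where LHS is not a superkey detected).", violations_bcnf
--
--     return "BCNF", "Satisfies BCNF (All determinants are superkeys).", []
-- ===== SOURCE B (Python) =====
-- def _closure(attributes, fds):
--     """Worklist attribute closure: residual-LHS counters, each popped attribute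
--     decrements the counters of the still-pending FDs; an FD fires (adds its RHS)
--     exactly when its counter hits zero, and is dropped from the pending list."""
--     closure = set(attributes)
--     queue = list(closure)
--     pend = []
--     for lhs, rhs in fds:
--         if lhs:
--             pend.append((len(lhs), lhs, rhs))
--         else:
--             for b in rhs:
--                 if b not in closure:
--                     closure.add(b)
--                     queue.append(b)
--     while queue:
--         a = queue.pop()
--         new_pend = []
--         for cnt, lhs, rhs in pend:
--             if a in lhs:
--                 cnt -= 1
--                 if cnt == 0:
--                     for b in rhs:
--                         if b not in closure:
--                             closure.add(b)
--                             queue.append(b)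
--                     continue
--             new_pend.append((cnt, lhs, rhs))
--         pend = new_pend
--     return closure
--
-- def determine_normal_form(relation_attrs, fds, candidate_keys):
--     prime = set()
--     for key in candidate_keys:
--         prime |= set(key)
--     v2, v3, vb = [], [], []
--     for lhs, rhs in fds:
--         if not (lhs <= relation_attrs and rhs <= relation_attrs):
--             continue
--         clean = rhs - lhs
--         if not clean or relation_attrs <= _closure(lhs, fds):
--             continue
--         vb.append((lhs, clean, "LHS is not a superkey"))
--         nonprime = clean - prime
--         if nonprime:
--             if any(lhs < key for key in candidate_keys):
--                 v2.append((lhs, nonprime, "Partial dependency"))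
--             else:
--                 v3.append((lhs, nonprime, "Transitive dependency"))
--     if v2:
--         return "1NF", "Violates 2NF (Partial Dependencies detected).", v2
--     if v3:
--         return "2NF", "Violates 3NF (Transitive Dependencies detected).", v3
--     if vb:
--         return "3NF", "Violates BCNF (Dependencies where LHS is not a superkey detected).", vb
--     return "BCNF", "Satisfies BCNF (All determinants are superkeys).", []
-- ===== Notes on version B (the rewrite author's own statement) =====
-- stated objective: alternative
-- what changed: Replaces A's attribute closure (repeated full passes over all FDs until a pass makes no change, re-testing every subset each pass) with a worklist closure: residual LHS counters per pending FD, decremented as each newly derived attribute is popped from a queue; an FD fires exactly once, when its counter hits zero, and is dropped from the pending list; the 2NF/3NF/BCNF classification is folded into one branch per FD with any() instead of A's break loop.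
import Mathlib
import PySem

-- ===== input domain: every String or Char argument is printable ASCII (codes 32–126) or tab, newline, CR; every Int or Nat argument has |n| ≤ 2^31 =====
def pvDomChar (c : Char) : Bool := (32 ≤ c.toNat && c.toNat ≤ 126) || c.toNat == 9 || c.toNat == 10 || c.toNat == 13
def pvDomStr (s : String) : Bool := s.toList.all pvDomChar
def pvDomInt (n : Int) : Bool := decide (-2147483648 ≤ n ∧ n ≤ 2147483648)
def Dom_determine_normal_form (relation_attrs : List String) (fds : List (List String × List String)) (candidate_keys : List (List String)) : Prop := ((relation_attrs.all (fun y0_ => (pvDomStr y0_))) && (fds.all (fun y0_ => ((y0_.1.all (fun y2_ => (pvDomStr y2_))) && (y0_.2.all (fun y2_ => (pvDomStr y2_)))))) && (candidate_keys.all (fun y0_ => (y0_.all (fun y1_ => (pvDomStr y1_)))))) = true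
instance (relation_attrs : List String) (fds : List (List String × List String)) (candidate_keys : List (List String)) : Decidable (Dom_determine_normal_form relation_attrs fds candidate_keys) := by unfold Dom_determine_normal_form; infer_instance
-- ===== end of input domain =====

-- B replaces A's re-scan-until-stable attribute closure by a worklist closure with
-- residual LHS counters (each FD fires once and is dropped); objective: alternative algorithm, same cost.

-- ===== PORT A =====
-- one 'for lhs, rhs in fds' pass of attribute_closure's while body (state: closure, changed)
def pvAcPass (fds : List (List String × List String)) (c : PySem.Set String) : PySem.Set String × Bool :=
  fds.foldl (fun st fd =>
    if PySem.Set.issubset fd.1 st.1 then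
      if !(PySem.Set.issubset fd.2 st.1) then (PySem.Set.update st.1 fd.2, true) else st
    else st) (c, false)

-- 'while changed' loop; fuel only makes it total: the loop re-runs only while the closure
-- strictly grew, which can happen at most (attributes ++ all rhs).length times (proved below)
def pvAcLoop (fds : List (List String × List String)) : Nat → PySem.Set String → PySem.Set String
  | 0, c => c
  | fuel+1, c =>
    let st := pvAcPass fds c
    if st.2 then pvAcLoop fds fuel st.1 else st.1

def attribute_closure (attributes : List String) (fds : List (List String × List String)) : PySem.Set String :=
  pvAcLoop fds ((attributes ++ fds.flatMap (fun fd => fd.2)).length + 1) attributes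

-- 'for key in candidate_keys: if lhs.issubset(key) and lhs != key: …; break'
def pvProperLoop (lhs : List String) : List (List String) → Bool
  | [] => false
  | key :: rest =>
    if PySem.Set.issubset lhs key && !(PySem.Set.equal lhs key) then true
    else pvProperLoop lhs rest

-- the body of A's 'for lhs, rhs in fds' loop
def pvMainStepA (relation_attrs : List String) (fds : List (List String × List String)) (candidate_keys : List (List String)) (prime : PySem.Set String)
    (acc : List (List String × List String × String) × List (List String × List String × String) × List (List String × List String × String))
    (fd : List String × List String) : List (List String × List String × String) × List (List String × List String × String) × List (List String × List String × String) :=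
  if !(PySem.Set.issubset fd.1 relation_attrs) || !(PySem.Set.issubset fd.2 relation_attrs) then acc
  else
    let clean := PySem.Set.diff fd.2 fd.1
    if clean.isEmpty then acc
    else
      let lhsClosure := attribute_closure fd.1 fds
      let isSuperkey := PySem.Set.issubset relation_attrs lhsClosure
      if isSuperkey then acc
      else
        let vb := acc.2.2 ++ [(fd.1, clean, "LHS is not a superkey")]
        let isProper := pvProperLoop fd.1 candidate_keys
        let nonPrime := PySem.Set.diff clean prime
        let v2 := if isProper && !nonPrime.isEmpty then acc.1 ++ [(fd.1, nonPrime, "Partial dependency")] else acc.1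
        let v3 := if !isProper && !nonPrime.isEmpty then acc.2.1 ++ [(fd.1, nonPrime, "Transitive dependency")] else acc.2.1
        (v2, v3, vb)

def determine_normal_form (relation_attrs : List String) (fds : List (List String × List String)) (candidate_keys : List (List String)) : String × String × (List (List String × List String × String)) :=
  let prime := candidate_keys.foldl (fun s k => PySem.Set.update s k) PySem.Set.empty
  let st := fds.foldl (pvMainStepA relation_attrs fds candidate_keys prime) ([], [], [])
  if !st.1.isEmpty then ("1NF", "Violates 2NF (Partial Dependencies detected).", st.1)
  else if !st.2.1.isEmpty then ("2NF", "Violates 3NF (Transitive Dependencies detected).", st.2.1)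
  else if !st.2.2.isEmpty then ("3NF", "Violates BCNF (Dependencies where LHS is not a superkey detected).", st.2.2)
  else ("BCNF", "Satisfies BCNF (All determinants are superkeys).", [])

-- ===== PORT B =====
-- 'for b in rhs: if b not in closure: closure.add(b); queue.append(b)'
def pvFire (c : PySem.Set String) (q : List String) (rhs : List String) : PySem.Set String × List String :=
  rhs.foldl (fun st b =>
    if PySem.Set.contains st.1 b then st else (PySem.Set.add st.1 b, st.2 ++ [b])) (c, q)

-- build the pending counter list; FDs with empty LHS fire immediately
def pvInitScan (fds : List (List String × List String)) (c : PySem.Set String) (q : List String) :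
    List (Int × List String × List String) × PySem.Set String × List String :=
  fds.foldl (fun st fd =>
    if fd.1.isEmpty then
      let f := pvFire st.2.1 st.2.2 fd.2
      (st.1, f.1, f.2)
    else (st.1 ++ [((fd.1.length : Int), fd.1, fd.2)], st.2.1, st.2.2)) ([], c, q)

-- one pass of the while body: decrement counters of pending FDs whose LHS contains a;
-- an FD whose counter reaches 0 fires and is dropped, the others are kept
def pvScan (a : String) (pend : List (Int × List String × List String)) (c : PySem.Set String) (q : List String) :
    List (Int × List String × List String) × PySem.Set String × List String :=
  pend.foldl (fun st e =>
    if e.2.1.contains a then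
      if e.1 - 1 == 0 then
        let f := pvFire st.2.1 st.2.2 e.2.2
        (st.1, f.1, f.2)
      else (st.1 ++ [(e.1 - 1, e.2.1, e.2.2)], st.2.1, st.2.2)
    else (st.1 ++ [e], st.2.1, st.2.2)) ([], c, q)

-- 'while queue: a = queue.pop(); …'; fuel only makes it total: every iteration pops one
-- queue element and at most (attributes ++ all rhs).length elements ever enter the queue
def pvWorklist : Nat → List (Int × List String × List String) → PySem.Set String → List String → PySem.Set String
  | 0, _, c, _ => c
  | fuel+1, pend, c, q =>
    match q.getLast? with
    | none => c
    | some a =>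
      let st := pvScan a pend c q.dropLast
      pvWorklist fuel st.1 st.2.1 st.2.2

def pvClosureB (attributes : List String) (fds : List (List String × List String)) : PySem.Set String :=
  let c0 := PySem.Set.ofList attributes
  let st := pvInitScan fds c0 c0
  pvWorklist ((attributes ++ fds.flatMap (fun fd => fd.2)).length + 1) st.1 st.2.1 st.2.2

-- the body of B's 'for lhs, rhs in fds' loop
def pvMainStepB (relation_attrs : List String) (fds : List (List String × List String)) (candidate_keys : List (List String)) (prime : PySem.Set String)
    (acc : List (List String × List String × String) × List (List String × List String × String) × List (List String × List String × String))
    (fd : List String × List String) : List (List String × List String × String) × List (List String × List String × String) × List (List String × List String × String) :=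
  if PySem.Set.issubset fd.1 relation_attrs && PySem.Set.issubset fd.2 relation_attrs then
    let clean := PySem.Set.diff fd.2 fd.1
    if clean.isEmpty || PySem.Set.issubset relation_attrs (pvClosureB fd.1 fds) then acc
    else
      let vb := acc.2.2 ++ [(fd.1, clean, "LHS is not a superkey")]
      let nonPrime := PySem.Set.diff clean prime
      if nonPrime.isEmpty then (acc.1, acc.2.1, vb)
      else if candidate_keys.any (fun k => PySem.Set.issubset fd.1 k && !(PySem.Set.equal fd.1 k)) then
        (acc.1 ++ [(fd.1, nonPrime, "Partial dependency")], acc.2.1, vb)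
      else (acc.1, acc.2.1 ++ [(fd.1, nonPrime, "Transitive dependency")], vb)
  else acc

def determine_normal_form_alt (relation_attrs : List String) (fds : List (List String × List String)) (candidate_keys : List (List String)) : String × String × (List (List String × List String × String)) :=
  let prime := candidate_keys.foldl (fun s k => PySem.Set.update s k) PySem.Set.empty
  let st := fds.foldl (pvMainStepB relation_attrs fds candidate_keys prime) ([], [], [])
  if !st.1.isEmpty then ("1NF", "Violates 2NF (Partial Dependencies detected).", st.1)
  else if !st.2.1.isEmpty then ("2NF", "Violates 3NF (Transitive Dependencies detected).", st.2.1)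
  else if !st.2.2.isEmpty then ("3NF", "Violates BCNF (Dependencies where LHS is not a superkey detected).", st.2.2)
  else ("BCNF", "Satisfies BCNF (All determinants are superkeys).", [])

-- ===== PRECONDITION & SPEC =====
-- The set-typed arguments (relation_attrs, both sides of every FD, every candidate key) are
-- Python sets; by the type convention they arrive as lists of DISTINCT elements, which Pre_ states.
def Pre_determine_normal_form (relation_attrs : List String) (fds : List (List String × List String)) (candidate_keys : List (List String)) : Prop :=
  relation_attrs.Nodup ∧ (∀ fd ∈ fds, fd.1.Nodup ∧ fd.2.Nodup) ∧ (∀ k ∈ candidate_keys, k.Nodup)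
instance (relation_attrs : List String) (fds : List (List String × List String)) (candidate_keys : List (List String)) : Decidable (Pre_determine_normal_form relation_attrs fds candidate_keys) := by unfold Pre_determine_normal_form; infer_instance

def pvWitness_determine_normal_form : List String × (List (List String × List String)) × List (List String) :=
  (["A", "B", "C"], [(["A"], ["B"]), (["B"], ["C"])], [["A"]])

def Spec_determine_normal_form (relation_attrs : List String) (fds : List (List String × List String)) (candidate_keys : List (List String)) (out : String × String × (List (List String × List String × String))) : Prop := out = determine_normal_form_alt relation_attrs fds candidate_keys
instance (relation_attrs : List String) (fds : List (List String × List String)) (candidate_keys : List (List String)) (out : String × String × (List (List String × List String × String))) : Decidable (Spec_determine_normal_form relation_attrs fds candidate_keys out) := by unfold Spec_determine_normal_form; infer_instance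

-- ===== CLAIM (what is proved, stated in full; the proofs are below) =====
def Claim_equal_determine_normal_form : Prop := ∀ (relation_attrs : List String) (fds : List (List String × List String)) (candidate_keys : List (List String)), Dom_determine_normal_form relation_attrs fds candidate_keys → Pre_determine_normal_form relation_attrs fds candidate_keys → Spec_determine_normal_form relation_attrs fds candidate_keys (determine_normal_form relation_attrs fds candidate_keys)

-- ===== LEMMAS AND PROOFS =====

-- attributes derivable from `base` under the FDs: the mathematical meaning both closures compute
inductive pvDeriv (base : List String) (fds : List (List String × List String)) : String → Prop where
  | base : ∀ {a}, a ∈ base → pvDeriv base fds a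
  | step : ∀ {lhs rhs a}, (lhs, rhs) ∈ fds → (∀ x ∈ lhs, pvDeriv base fds x) → a ∈ rhs → pvDeriv base fds a

theorem pvDeriv_mem {base : List String} {fds : List (List String × List String)} {R : List String}
    (hb : ∀ x ∈ base, x ∈ R)
    (hc : ∀ fd ∈ fds, (∀ y ∈ fd.1, y ∈ R) → ∀ y ∈ fd.2, y ∈ R) :
    ∀ {x : String}, pvDeriv base fds x → x ∈ R := by
  intro x h
  induction h with
  | base h => exact hb _ h
  | step hfd _ hr ih => exact hc _ hfd (fun y hy => ih y hy) _ hr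

-- length of a nodup list contained in another list
theorem pvNodupLenLe {l u : List String} (h : l.Nodup) (hs : ∀ x ∈ l, x ∈ u) : l.length ≤ u.length := by
  have h1 : l.toFinset.card = l.length := List.toFinset_card_of_nodup h
  have h2 : l.toFinset ⊆ u.toFinset := by intro x hx; simp only [List.mem_toFinset] at hx ⊢; exact hs x hx
  have h3 := Finset.card_le_card h2
  have h4 := u.toFinset_card_le
  omega

-- A's pass step function (the lambda of pvAcPass)
def pvAcStep (st : PySem.Set String × Bool) (fd : List String × List String) : PySem.Set String × Bool :=
  if PySem.Set.issubset fd.1 st.1 then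
    if !(PySem.Set.issubset fd.2 st.1) then (PySem.Set.update st.1 fd.2, true) else st
  else st

theorem pvAcPass_eq (fds : List (List String × List String)) (c : PySem.Set String) :
    pvAcPass fds c = fds.foldl pvAcStep (c, false) := rfl

theorem pvAcStep_of_snd_false {st : PySem.Set String × Bool} {fd : List String × List String}
    (h : (pvAcStep st fd).2 = false) : pvAcStep st fd = st := by
  unfold pvAcStep at *
  split_ifs at h ⊢ <;> simp_all

theorem pvAcFold_prefix (fds : List (List String × List String)) :
    ∀ st : PySem.Set String × Bool, st.1 <+: (fds.foldl pvAcStep st).1 := by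
  induction fds with
  | nil => intro st; exact List.prefix_refl _
  | cons fd t ih =>
    intro st
    have h1 : st.1 <+: (pvAcStep st fd).1 := by
      unfold pvAcStep
      split_ifs
      · rw [PySem.Set.update_eq_append_filter]; exact List.prefix_append _ _
      · exact List.prefix_refl _
      · exact List.prefix_refl _
    exact h1.trans (ih _)

theorem pvAcFold_snd_true (fds : List (List String × List String)) :
    ∀ st : PySem.Set String × Bool, st.2 = true → (fds.foldl pvAcStep st).2 = true := by
  induction fds with
  | nil => intro st h; exact h
  | cons fd t ih =>
    intro st h
    apply ih
    unfold pvAcStep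
    split_ifs <;> simp_all

theorem pvAcFold_of_snd_false (fds : List (List String × List String)) :
    ∀ st : PySem.Set String × Bool, (fds.foldl pvAcStep st).2 = false → fds.foldl pvAcStep st = st := by
  induction fds with
  | nil => intro st _; rfl
  | cons fd t ih =>
    intro st h
    simp only [List.foldl_cons] at h ⊢
    have h1 := ih _ h
    rw [h1] at h ⊢
    exact pvAcStep_of_snd_false h

theorem pvAcFold_closed (fds : List (List String × List String)) :
    ∀ st : PySem.Set String × Bool, (fds.foldl pvAcStep st).2 = false →
      ∀ fd ∈ fds, (∀ y ∈ fd.1, y ∈ st.1) → ∀ y ∈ fd.2, y ∈ st.1 := by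
  induction fds with
  | nil => intro st _ fd hfd; simp at hfd
  | cons fd0 t ih =>
    intro st h fd hfd hlhs
    simp only [List.foldl_cons] at h
    have hst' := pvAcFold_of_snd_false t _ h
    rw [hst'] at h
    have hstep := pvAcStep_of_snd_false h
    rcases List.mem_cons.mp hfd with rfl | hmem
    · -- head FD: it must not have fired
      have hs1 : PySem.Set.issubset fd.1 st.1 = true := (PySem.Set.issubset_iff _ _).mpr hlhs
      by_cases hs2 : PySem.Set.issubset fd.2 st.1 = true
      · exact fun y hy => (PySem.Set.issubset_iff _ _).mp hs2 y hy
      · exfalso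
        have : (pvAcStep st fd).2 = true := by
          unfold pvAcStep; rw [hs1]; simp [hs2]
        rw [hstep] at this
        rw [hstep] at hst'
        have := pvAcFold_snd_true t st this
        rw [hst'] at this
        simp_all
    · have : t.foldl pvAcStep (pvAcStep st fd0) = pvAcStep st fd0 := hst'
      have := ih (pvAcStep st fd0) (by rw [hst']; exact h) fd hmem
      rw [hstep] at this
      exact this hlhs

theorem pvAcFold_nodup (fds : List (List String × List String)) :
    ∀ st : PySem.Set String × Bool, st.1.Nodup → (fds.foldl pvAcStep st).1.Nodup := by
  induction fds with
  | nil => intro st h; exact h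
  | cons fd t ih =>
    intro st h
    apply ih
    unfold pvAcStep
    split_ifs
    · exact PySem.Set.nodup_update _ _ h
    · exact h
    · exact h

theorem pvAcFold_bound (fds : List (List String × List String)) :
    ∀ st : PySem.Set String × Bool, ∀ x ∈ (fds.foldl pvAcStep st).1, x ∈ st.1 ∨ ∃ fd ∈ fds, x ∈ fd.2 := by
  induction fds with
  | nil => intro st x hx; exact Or.inl hx
  | cons fd t ih =>
    intro st x hx
    simp only [List.foldl_cons] at hx
    rcases ih _ x hx with hx' | ⟨fd', hfd', hx'⟩
    · unfold pvAcStep at hx'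
      split_ifs at hx'
      · rcases (PySem.Set.mem_update _ _ _).mp hx' with h | h
        · exact Or.inl h
        · exact Or.inr ⟨fd, List.mem_cons_self, h⟩
      · exact Or.inl hx'
      · exact Or.inl hx'
    · exact Or.inr ⟨fd', List.mem_cons_of_mem _ hfd', hx'⟩

theorem pvAcFold_deriv (base : List String) (F fds : List (List String × List String))
    (hsub : ∀ fd ∈ fds, fd ∈ F) :
    ∀ st : PySem.Set String × Bool, (∀ x ∈ st.1, pvDeriv base F x) →
      ∀ x ∈ (fds.foldl pvAcStep st).1, pvDeriv base F x := by
  induction fds with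
  | nil => intro st h x hx; exact h x hx
  | cons fd t ih =>
    intro st h x hx
    simp only [List.foldl_cons] at hx
    refine ih (fun fd' hfd' => hsub fd' (List.mem_cons_of_mem _ hfd')) _ ?_ x hx
    intro y hy
    unfold pvAcStep at hy
    split_ifs at hy with hs1 hs2
    · rcases (PySem.Set.mem_update _ _ _).mp hy with h' | h'
      · exact h y h'
      · refine pvDeriv.step (lhs := fd.1) (rhs := fd.2) ?_ ?_ h'
        · exact hsub fd List.mem_cons_self
        · intro z hz
          exact h z ((PySem.Set.issubset_iff _ _).mp hs1 z hz)
    · exact h y hy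
    · exact h y hy

theorem pvUpdateLenLt {s : PySem.Set String} {xs : List String}
    (h : ¬ (PySem.Set.issubset xs s = true)) : s.length < (PySem.Set.update s xs).length := by
  rw [PySem.Set.update_eq_append_filter]
  rw [PySem.Set.issubset_iff] at h
  push Not at h
  obtain ⟨y, hy, hyn⟩ := h
  have hmem : y ∈ (PySem.Set.ofList xs).filter (fun z => !(PySem.Set.contains s z)) := by
    rw [List.mem_filter]
    refine ⟨(PySem.Set.mem_ofList _ _).mpr hy, ?_⟩
    simp [hyn]
  have := List.length_pos_of_mem hmem
  simp only [List.length_append]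
  omega

theorem pvAcFold_grow (fds : List (List String × List String)) :
    ∀ st : PySem.Set String × Bool, st.2 = false → (fds.foldl pvAcStep st).2 = true →
      st.1.length < (fds.foldl pvAcStep st).1.length := by
  induction fds with
  | nil =>
    intro st h1 h2
    simp only [List.foldl_nil] at h2
    rw [h1] at h2; simp at h2
  | cons fd t ih =>
    intro st h1 h2
    simp only [List.foldl_cons] at h2 ⊢
    by_cases hs : (pvAcStep st fd).2 = true
    · have hfired : (pvAcStep st fd).1 = PySem.Set.update st.1 fd.2 ∧
          ¬ (PySem.Set.issubset fd.2 st.1 = true) := by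
        unfold pvAcStep at hs ⊢
        split_ifs at hs ⊢ with ha hb <;> simp_all
      have hlt : st.1.length < (pvAcStep st fd).1.length := by
        rw [hfired.1]; exact pvUpdateLenLt hfired.2
      have hle := (pvAcFold_prefix t (pvAcStep st fd)).length_le
      omega
    · have : pvAcStep st fd = st := pvAcStep_of_snd_false (by simpa using hs)
      rw [this] at h2 ⊢
      exact ih st h1 h2

-- universe of attributes a closure can contain
def pvU (att : List String) (fds : List (List String × List String)) : List String :=
  PySem.Set.ofList (att ++ fds.flatMap (fun fd => fd.2))

theorem pvU_mem {att : List String} {fds : List (List String × List String)} {x : String}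
    (h : x ∈ att ∨ ∃ fd ∈ fds, x ∈ fd.2) : x ∈ pvU att fds := by
  unfold pvU
  rw [PySem.Set.mem_ofList]
  rw [List.mem_append]
  rcases h with h | ⟨fd, hfd, hx⟩
  · exact Or.inl h
  · exact Or.inr (List.mem_flatMap.mpr ⟨fd, hfd, hx⟩)

theorem pvAcLoop_spec (att : List String) (fds : List (List String × List String)) :
    ∀ (fuel : Nat) (c : PySem.Set String), c.Nodup →
      (∀ x ∈ c, x ∈ pvU att fds) → (∀ x ∈ c, pvDeriv att fds x) →
      ((pvU att fds).length + 1 ≤ fuel + c.length) →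
      (∀ x ∈ c, x ∈ pvAcLoop fds fuel c) ∧
      (∀ fd ∈ fds, (∀ y ∈ fd.1, y ∈ pvAcLoop fds fuel c) → ∀ y ∈ fd.2, y ∈ pvAcLoop fds fuel c) ∧
      (∀ x ∈ pvAcLoop fds fuel c, pvDeriv att fds x) := by
  intro fuel
  induction fuel with
  | zero =>
    intro c hnd hU _ hlen
    exfalso
    have := pvNodupLenLe hnd hU
    omega
  | succ fuel ih =>
    intro c hnd hU hder hlen
    by_cases hch : (pvAcPass fds c).2 = true
    · have hloop : pvAcLoop fds (fuel+1) c = pvAcLoop fds fuel (pvAcPass fds c).1 := by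
        simp [pvAcLoop, hch]
      rw [hloop, pvAcPass_eq]
      rw [pvAcPass_eq] at hch
      set st := fds.foldl pvAcStep (c, false) with hst
      have hpre : c <+: st.1 := pvAcFold_prefix fds (c, false)
      have hnd' : st.1.Nodup := pvAcFold_nodup fds (c, false) hnd
      have hU' : ∀ x ∈ st.1, x ∈ pvU att fds := by
        intro x hx
        rcases pvAcFold_bound fds (c, false) x hx with h | h
        · exact hU x h
        · exact pvU_mem (Or.inr h)
      have hder' : ∀ x ∈ st.1, pvDeriv att fds x := pvAcFold_deriv att fds fds (fun _ h => h) (c, false) hder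
      have hgrow : c.length < st.1.length := pvAcFold_grow fds (c, false) rfl hch
      have hlen' : (pvU att fds).length + 1 ≤ fuel + st.1.length := by omega
      obtain ⟨h1, h2, h3⟩ := ih st.1 hnd' hU' hder' hlen'
      exact ⟨fun x hx => h1 x (hpre.subset hx), h2, h3⟩
    · have hch' : (pvAcPass fds c).2 = false := by simpa using hch
      have hloop : pvAcLoop fds (fuel+1) c = (pvAcPass fds c).1 := by
        simp [pvAcLoop, hch']
      rw [pvAcPass_eq] at hch' hloop
      have heq := pvAcFold_of_snd_false fds _ hch'
      have hc : (fds.foldl pvAcStep ((c : PySem.Set String), false)).1 = c := by rw [heq]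
      rw [hloop, hc]
      refine ⟨fun x hx => hx, ?_, hder⟩
      exact pvAcFold_closed fds (c, false) hch'

theorem pvMemA (att : List String) (fds : List (List String × List String)) (hnd : att.Nodup) :
    ∀ x, x ∈ attribute_closure att fds ↔ pvDeriv att fds x := by
  have harith : (pvU att fds).length + 1 ≤ ((att ++ fds.flatMap (fun fd => fd.2)).length + 1) + att.length := by
    have := PySem.Set.length_ofList_le (att ++ fds.flatMap (fun fd => fd.2))
    unfold pvU
    omega
  obtain ⟨h1, h2, h3⟩ := pvAcLoop_spec att fds ((att ++ fds.flatMap (fun fd => fd.2)).length + 1) att hnd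
    (fun x hx => pvU_mem (Or.inl hx)) (fun x hx => pvDeriv.base hx) harith
  intro x
  constructor
  · exact h3 x
  · intro hd
    exact pvDeriv_mem h1 h2 hd

-- number of LHS attributes not yet processed (processed = in closure c but no longer in queue q)
def pvMiss (c q lhs : List String) : Int :=
  ((lhs.countP (fun x => !(decide (x ∈ c ∧ x ∉ q)))) : Int)

theorem pvMiss_nonneg (c q lhs : List String) : 0 ≤ pvMiss c q lhs := by
  unfold pvMiss; positivity

theorem pvMiss_congr {c q c' q' : List String} (lhs : List String)
    (h : ∀ x, (x ∈ c ∧ x ∉ q) ↔ (x ∈ c' ∧ x ∉ q')) : pvMiss c q lhs = pvMiss c' q' lhs := by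
  unfold pvMiss
  congr 1
  apply List.countP_congr
  intro x _
  have := h x
  by_cases h1 : x ∈ c' ∧ x ∉ q' <;> simp_all

theorem pvCountP_update {l : List String} (hnd : l.Nodup) (p p' : String → Bool) (a : String)
    (hne : ∀ x, x ≠ a → p x = p' x) (hpa : p a = true) (hpa' : p' a = false) :
    (a ∈ l → l.countP p = l.countP p' + 1) ∧ (a ∉ l → l.countP p = l.countP p') := by
  induction l with
  | nil => simp
  | cons b t ih =>
    have hndt := hnd.of_cons
    obtain ⟨ih1, ih2⟩ := ih hndt
    by_cases hb : b = a
    · subst hb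
      have hbt : b ∉ t := (List.nodup_cons.mp hnd).1
      have ht : t.countP p = t.countP p' := ih2 hbt
      constructor
      · intro _
        simp only [List.countP_cons, hpa, hpa', ht]
        simp
      · intro hmem; exact absurd List.mem_cons_self hmem
    · have hpb : p b = p' b := hne b hb
      constructor
      · intro hmem
        rcases List.mem_cons.mp hmem with rfl | hmem'
        · exact absurd rfl hb
        · simp only [List.countP_cons, hpb, ih1 hmem']
          ring
      · intro hmem
        have hat : a ∉ t := fun h => hmem (List.mem_cons_of_mem _ h)
        simp only [List.countP_cons, hpb, ih2 hat]

theorem pvMiss_pop {c q l : List String} (hnd : l.Nodup) (a : String) (hac : a ∈ c) (hanq : a ∉ q) :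
    (a ∈ l → pvMiss c (q ++ [a]) l = pvMiss c q l + 1) ∧
    (a ∉ l → pvMiss c (q ++ [a]) l = pvMiss c q l) := by
  have h := pvCountP_update hnd
    (fun x => !(decide (x ∈ c ∧ x ∉ q ++ [a]))) (fun x => !(decide (x ∈ c ∧ x ∉ q))) a
    (by intro x hx; simp [List.mem_append, hx])
    (by simp [hac, hanq])
    (by simp [hac, hanq])
  unfold pvMiss
  constructor
  · intro hm; rw [(h.1) hm]; push_cast; ring
  · intro hm; rw [(h.2) hm]

theorem pvFire_spec (rhs : List String) :
    ∀ (c : PySem.Set String) (q : List String), ∃ new : List String,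
      (pvFire c q rhs).1 = c ++ new ∧ (pvFire c q rhs).2 = q ++ new ∧
      (∀ b ∈ new, b ∈ rhs ∧ b ∉ c) ∧ (∀ b ∈ rhs, b ∈ (pvFire c q rhs).1) ∧
      (c.Nodup → (pvFire c q rhs).1.Nodup) := by
  induction rhs with
  | nil => intro c q; exact ⟨[], by simp [pvFire], by simp [pvFire], by simp, by simp, fun h => by simpa [pvFire] using h⟩
  | cons b t ih =>
    intro c q
    by_cases hb : PySem.Set.contains c b = true
    · have hbm : b ∈ c := (PySem.Set.contains_iff _ _).mp hb
      have hstep : pvFire c q (b :: t) = pvFire c q t := by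
        simp [pvFire, hbm]
      obtain ⟨new, h1, h2, h3, h4, h5⟩ := ih c q
      refine ⟨new, by rw [hstep]; exact h1, by rw [hstep]; exact h2, ?_, ?_, by rw [hstep]; exact h5⟩
      · intro x hx; exact ⟨List.mem_cons_of_mem _ (h3 x hx).1, (h3 x hx).2⟩
      · intro x hx
        rcases List.mem_cons.mp hx with rfl | hx'
        · rw [hstep, h1]
          exact List.mem_append_left _ ((PySem.Set.contains_iff _ _).mp hb)
        · rw [hstep]; exact h4 x hx'
    · have hbnm : b ∉ c := fun h => hb ((PySem.Set.contains_iff _ _).mpr h)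
      have hadd : PySem.Set.add c b = c ++ [b] := PySem.Set.add_of_not_mem hbnm
      have hstep : pvFire c q (b :: t) = pvFire (c ++ [b]) (q ++ [b]) t := by
        simp [pvFire, hbnm]
      obtain ⟨new, h1, h2, h3, h4, h5⟩ := ih (c ++ [b]) (q ++ [b])
      rw [hstep]
      refine ⟨b :: new, by rw [h1]; simp, by rw [h2]; simp, ?_, ?_, ?_⟩
      · intro x hx
        rcases List.mem_cons.mp hx with rfl | hx'
        · exact ⟨List.mem_cons_self, hbnm⟩
        · obtain ⟨hm, hnm⟩ := h3 x hx'
          exact ⟨List.mem_cons_of_mem _ hm, fun h => hnm (List.mem_append_left _ h)⟩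
      · intro x hx
        rcases List.mem_cons.mp hx with rfl | hx'
        · rw [h1]; exact List.mem_append_left _ (List.mem_append_right _ List.mem_cons_self)
        · exact h4 x hx'
      · intro hcn
        apply h5
        simp only [List.nodup_append]
        refine ⟨hcn, List.nodup_singleton _, ?_⟩
        intro x hx y hy hxy
        subst hxy
        simp only [List.mem_singleton] at hy
        subst hy
        exact hbnm hx

-- B's while-body step function (the lambda of pvScan)
def pvScStep (a : String) (st : List (Int × List String × List String) × PySem.Set String × List String)
    (e : Int × List String × List String) : List (Int × List String × List String) × PySem.Set String × List String :=
  if e.2.1.contains a then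
    if e.1 - 1 == 0 then
      let f := pvFire st.2.1 st.2.2 e.2.2
      (st.1, f.1, f.2)
    else (st.1 ++ [(e.1 - 1, e.2.1, e.2.2)], st.2.1, st.2.2)
  else (st.1 ++ [e], st.2.1, st.2.2)

theorem pvScan_eq (a : String) (pend : List (Int × List String × List String)) (c : PySem.Set String) (q : List String) :
    pvScan a pend c q = pend.foldl (pvScStep a) ([], c, q) := rfl

-- invariant carried through one while-body pass: everything added during the pass goes to
-- closure AND queue simultaneously, so the processed set stays (· ∈ c ∧ · ∉ q')
def pvMid (att : List String) (fds : List (List String × List String)) (c : PySem.Set String) (q' : List String)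
    (np : List (Int × List String × List String)) (c₁ : PySem.Set String) (q₁ : List String) : Prop :=
  (∃ new, c₁ = c ++ new ∧ q₁ = q' ++ new ∧ (∀ b ∈ new, b ∉ c)) ∧
  c₁.Nodup ∧
  (∀ e ∈ np, e.2 ∈ fds ∧ e.1 = pvMiss c q' e.2.1 ∧ 1 ≤ e.1) ∧
  (∀ x ∈ c₁, pvDeriv att fds x) ∧
  (∀ x ∈ c₁, x ∈ pvU att fds)

theorem pvScan_fold (att : List String) (fds : List (List String × List String))
    (hPre : ∀ fd ∈ fds, fd.1.Nodup)
    (c : PySem.Set String) (q' : List String) (a : String)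
    (hac : a ∈ c) (hanq : a ∉ q') :
    ∀ (pend np : List (Int × List String × List String)) (c₁ : PySem.Set String) (q₁ : List String),
      pvMid att fds c q' np c₁ q₁ →
      (∀ e ∈ pend, e.2 ∈ fds ∧ e.1 = pvMiss c (q' ++ [a]) e.2.1 ∧ 1 ≤ e.1) →
      pvMid att fds c q' (pend.foldl (pvScStep a) (np, c₁, q₁)).1
        (pend.foldl (pvScStep a) (np, c₁, q₁)).2.1 (pend.foldl (pvScStep a) (np, c₁, q₁)).2.2 ∧
      np <+: (pend.foldl (pvScStep a) (np, c₁, q₁)).1 ∧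
      c₁ <+: (pend.foldl (pvScStep a) (np, c₁, q₁)).2.1 ∧
      (∀ e ∈ pend, (∃ e' ∈ (pend.foldl (pvScStep a) (np, c₁, q₁)).1, e'.2 = e.2) ∨
        (∀ y ∈ e.2.2, y ∈ (pend.foldl (pvScStep a) (np, c₁, q₁)).2.1)) := by
  intro pend
  induction pend with
  | nil =>
    intro np c₁ q₁ hmid _
    exact ⟨hmid, List.prefix_refl _, List.prefix_refl _, by simp⟩
  | cons e t ih =>
    intro np c₁ q₁ hmid hpend
    have he := hpend e List.mem_cons_self
    have ht := fun e' h' => hpend e' (List.mem_cons_of_mem _ h')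
    obtain ⟨hefd, hemiss, hege⟩ := he
    have hlnd : e.2.1.Nodup := hPre e.2 hefd
    have hpop := pvMiss_pop (c := c) (q := q') hlnd a hac hanq
    obtain ⟨⟨new, hc₁, hq₁, hnew⟩, hnd₁, hnp, hder₁, hU₁⟩ := hmid
    by_cases hmem : a ∈ e.2.1
    · have hcont : e.2.1.contains a = true := List.contains_iff_mem.mpr hmem
      have hmiss' : e.1 = pvMiss c q' e.2.1 + 1 := by rw [hemiss]; exact hpop.1 hmem
      by_cases hone : e.1 - 1 = 0
      · -- the FD fires: its whole LHS is processed
        have hmiss0 : pvMiss c q' e.2.1 = 0 := by omega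
        have hlhs_sub : ∀ x ∈ e.2.1, x ∈ c := by
          intro x hx
          unfold pvMiss at hmiss0
          have : e.2.1.countP (fun x => !(decide (x ∈ c ∧ x ∉ q'))) = 0 := by exact_mod_cast hmiss0
          have := (List.countP_eq_zero.mp this) x hx
          simp only [Bool.not_eq_true'] at this
          have := of_decide_eq_true (by simpa using this)
          exact this.1
        have hder_rhs : ∀ y ∈ e.2.2, pvDeriv att fds y := by
          intro y hy
          refine pvDeriv.step (lhs := e.2.1) (rhs := e.2.2) ?_ ?_ hy
          · exact hefd
          · intro z hz
            exact hder₁ z (by rw [hc₁]; exact List.mem_append_left _ (hlhs_sub z hz))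
        have hstep : pvScStep a (np, c₁, q₁) e =
            (np, (pvFire c₁ q₁ e.2.2).1, (pvFire c₁ q₁ e.2.2).2) := by
          unfold pvScStep
          rw [hcont]
          simp [hone]
        obtain ⟨new₂, hf1, hf2, hf3, hf4, hf5⟩ := pvFire_spec e.2.2 c₁ q₁
        have hmid' : pvMid att fds c q' np (pvFire c₁ q₁ e.2.2).1 (pvFire c₁ q₁ e.2.2).2 := by
          refine ⟨⟨new ++ new₂, ?_, ?_, ?_⟩, hf5 hnd₁, hnp, ?_, ?_⟩
          · rw [hf1, hc₁, List.append_assoc]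
          · rw [hf2, hq₁, List.append_assoc]
          · intro b hb
            rcases List.mem_append.mp hb with hb | hb
            · exact hnew b hb
            · intro hbc
              exact (hf3 b hb).2 (by rw [hc₁]; exact List.mem_append_left _ hbc)
          · intro x hx
            rw [hf1] at hx
            rcases List.mem_append.mp hx with hx | hx
            · exact hder₁ x hx
            · exact hder_rhs x (hf3 x hx).1
          · intro x hx
            rw [hf1] at hx
            rcases List.mem_append.mp hx with hx | hx
            · exact hU₁ x hx
            · exact pvU_mem (Or.inr ⟨e.2, hefd, (hf3 x hx).1⟩)
        have hfold : (e :: t).foldl (pvScStep a) (np, c₁, q₁) =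
            t.foldl (pvScStep a) (np, (pvFire c₁ q₁ e.2.2).1, (pvFire c₁ q₁ e.2.2).2) := by
          simp only [List.foldl_cons, hstep]
        obtain ⟨hm, hpr, hcpr, hcov⟩ := ih np (pvFire c₁ q₁ e.2.2).1 (pvFire c₁ q₁ e.2.2).2 hmid' ht
        rw [hfold]
        refine ⟨hm, hpr, ?_, ?_⟩
        · refine List.IsPrefix.trans ?_ hcpr
          rw [hf1]; exact List.prefix_append _ _
        · intro e' he'
          rcases List.mem_cons.mp he' with rfl | he''
          · right
            intro y hy
            exact hcpr.subset (hf4 y hy)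
          · exact hcov e' he''
      · -- counter decremented, FD kept
        have hstep : pvScStep a (np, c₁, q₁) e = (np ++ [(e.1 - 1, e.2.1, e.2.2)], c₁, q₁) := by
          unfold pvScStep
          rw [hcont]
          simp [hone]
        have hmid' : pvMid att fds c q' (np ++ [(e.1 - 1, e.2.1, e.2.2)]) c₁ q₁ := by
          refine ⟨⟨new, hc₁, hq₁, hnew⟩, hnd₁, ?_, hder₁, hU₁⟩
          intro e' he'
          rcases List.mem_append.mp he' with he' | he'
          · exact hnp e' he'
          · simp only [List.mem_singleton] at he'
            subst he'
            have hnn := pvMiss_nonneg c q' e.2.1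
            refine ⟨hefd, ?_, ?_⟩ <;> dsimp only <;> omega
        have hfold : (e :: t).foldl (pvScStep a) (np, c₁, q₁) =
            t.foldl (pvScStep a) (np ++ [(e.1 - 1, e.2.1, e.2.2)], c₁, q₁) := by
          simp only [List.foldl_cons, hstep]
        obtain ⟨hm, hpr, hcpr, hcov⟩ := ih _ c₁ q₁ hmid' ht
        rw [hfold]
        refine ⟨hm, ?_, hcpr, ?_⟩
        · exact (List.prefix_append _ _).trans hpr
        · intro e' he'
          rcases List.mem_cons.mp he' with rfl | he''
          · left
            refine ⟨(e'.1 - 1, e'.2.1, e'.2.2), hpr.subset (List.mem_append_right _ List.mem_cons_self), rfl⟩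
          · exact hcov e' he''
    · -- a not in this LHS: FD kept unchanged
      have hcont : e.2.1.contains a = false := by
        rw [Bool.eq_false_iff]
        intro h
        exact hmem (List.contains_iff_mem.mp h)
      have hstep : pvScStep a (np, c₁, q₁) e = (np ++ [e], c₁, q₁) := by
        unfold pvScStep
        rw [hcont]
        simp
      have hmid' : pvMid att fds c q' (np ++ [e]) c₁ q₁ := by
        refine ⟨⟨new, hc₁, hq₁, hnew⟩, hnd₁, ?_, hder₁, hU₁⟩
        intro e' he'
        rcases List.mem_append.mp he' with he' | he'
        · exact hnp e' he'
        · simp only [List.mem_singleton] at he'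
          subst he'
          exact ⟨hefd, by rw [hemiss]; exact hpop.2 hmem, hege⟩
      have hfold : (e :: t).foldl (pvScStep a) (np, c₁, q₁) = t.foldl (pvScStep a) (np ++ [e], c₁, q₁) := by
        simp only [List.foldl_cons, hstep]
      obtain ⟨hm, hpr, hcpr, hcov⟩ := ih _ c₁ q₁ hmid' ht
      rw [hfold]
      refine ⟨hm, (List.prefix_append _ _).trans hpr, hcpr, ?_⟩
      intro e' he'
      rcases List.mem_cons.mp he' with rfl | he''
      · exact Or.inl ⟨e', hpr.subset (List.mem_append_right _ List.mem_cons_self), rfl⟩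
      · exact hcov e' he''

-- the invariant of B's while loop
def pvInv (att : List String) (fds : List (List String × List String))
    (pend : List (Int × List String × List String)) (c : PySem.Set String) (q : List String) : Prop :=
  c.Nodup ∧ (∀ x ∈ q, x ∈ c) ∧ q.Nodup ∧
  (∀ e ∈ pend, e.2 ∈ fds ∧ e.1 = pvMiss c q e.2.1 ∧ 1 ≤ e.1) ∧
  (∀ fd ∈ fds, (∃ e ∈ pend, e.2 = fd) ∨ (∀ y ∈ fd.2, y ∈ c)) ∧
  (∀ x ∈ c, pvDeriv att fds x) ∧
  (∀ x ∈ c, x ∈ pvU att fds)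

theorem pvWorklist_spec (att : List String) (fds : List (List String × List String))
    (hPre : ∀ fd ∈ fds, fd.1.Nodup) :
    ∀ (fuel : Nat) (pend : List (Int × List String × List String)) (c : PySem.Set String) (q : List String),
      pvInv att fds pend c q →
      ((pvU att fds).length + 1 + q.length ≤ fuel + c.length) →
      (∀ x ∈ c, x ∈ pvWorklist fuel pend c q) ∧
      (∀ fd ∈ fds, (∀ y ∈ fd.1, y ∈ pvWorklist fuel pend c q) → ∀ y ∈ fd.2, y ∈ pvWorklist fuel pend c q) ∧
      (∀ x ∈ pvWorklist fuel pend c q, pvDeriv att fds x) := by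
  intro fuel
  induction fuel with
  | zero =>
    intro pend c q hinv hlen
    exfalso
    obtain ⟨hnd, _, _, _, _, _, hU⟩ := hinv
    have := pvNodupLenLe hnd hU
    omega
  | succ fuel ih =>
    intro pend c q hinv hlen
    obtain ⟨hnd, hqc, hqnd, hent, hcov, hder, hU⟩ := hinv
    rcases hq : q.getLast? with _ | a
    · -- queue empty: the loop stops; the closure is closed
      have hqnil : q = [] := List.getLast?_eq_none_iff.mp hq
      subst hqnil
      have hres : pvWorklist (fuel+1) pend c [] = c := by simp [pvWorklist]
      rw [hres]
      refine ⟨fun x hx => hx, ?_, hder⟩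
      intro fd hfd hlhs
      rcases hcov fd hfd with ⟨e, he, he2⟩ | h
      · exfalso
        obtain ⟨_, hm, hge⟩ := hent e he
        rw [he2] at hm
        have : pvMiss c [] fd.1 = ((fd.1.countP (fun x => !(decide (x ∈ c ∧ x ∉ ([] : List String))))) : Int) := rfl
        have hz : fd.1.countP (fun x => !(decide (x ∈ c ∧ x ∉ ([] : List String)))) = 0 := by
          rw [List.countP_eq_zero]
          intro x hx
          simp [hlhs x hx]
        rw [hm] at hge
        unfold pvMiss at hge
        rw [hz] at hge
        omega
      · exact h
    · -- pop the last queue element and run the pass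
      obtain ⟨q', rfl⟩ := List.getLast?_eq_some_iff.mp hq
      have hdrop : (q' ++ [a]).dropLast = q' := List.dropLast_concat
      have hres : pvWorklist (fuel+1) pend c (q' ++ [a]) =
          pvWorklist fuel (pvScan a pend c q').1 (pvScan a pend c q').2.1 (pvScan a pend c q').2.2 := by
        simp [pvWorklist, hq, hdrop]
      have hac : a ∈ c := hqc a (List.mem_append_right _ List.mem_cons_self)
      have hq'split : q'.Nodup ∧ a ∉ q' := by
        rw [List.nodup_append_comm] at hqnd
        simp only [List.singleton_append, List.nodup_cons] at hqnd
        exact ⟨hqnd.2, hqnd.1⟩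
      have hmid0 : pvMid att fds c q' [] c q' := by
        refine ⟨⟨[], by simp, by simp, by simp⟩, hnd, by simp, hder, hU⟩
      rw [pvScan_eq] at hres
      obtain ⟨⟨⟨new, hc', hq'', hnewc⟩, hnd', hnp', hder', hU'⟩, _, hcpr, hcov'⟩ :=
        pvScan_fold att fds hPre c q' a hac hq'split.2 pend [] c q' hmid0 hent
      set r := pend.foldl (pvScStep a) ([], c, q') with hr
      have hnewnodup : new.Nodup ∧ ∀ b ∈ new, b ∉ c := by
        rw [hc'] at hnd'
        rw [List.nodup_append] at hnd'
        exact ⟨hnd'.2.1, hnewc⟩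
      have hinv' : pvInv att fds r.1 r.2.1 r.2.2 := by
        refine ⟨hnd', ?_, ?_, ?_, ?_, hder', hU'⟩
        · intro x hx
          rw [hq''] at hx
          rw [hc']
          rcases List.mem_append.mp hx with hx | hx
          · exact List.mem_append_left _ (hqc x (List.mem_append_left _ hx))
          · exact List.mem_append_right _ hx
        · rw [hq'', List.nodup_append]
          refine ⟨hq'split.1, hnewnodup.1, ?_⟩
          intro x hx y hy hxy
          subst hxy
          exact hnewnodup.2 x hy (hqc x (List.mem_append_left _ hx))
        · intro e he
          obtain ⟨hefd, hm, hge⟩ := hnp' e he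
          refine ⟨hefd, ?_, hge⟩
          rw [hm]
          apply pvMiss_congr
          intro x
          constructor
          · intro ⟨hxc, hxq⟩
            refine ⟨by rw [hc']; exact List.mem_append_left _ hxc, ?_⟩
            rw [hq'']
            intro hmem
            rcases List.mem_append.mp hmem with h | h
            · exact hxq h
            · exact hnewc x h hxc
          · intro ⟨hxc, hxq⟩
            rw [hc'] at hxc
            rcases List.mem_append.mp hxc with h | h
            · exact ⟨h, fun h' => hxq (by rw [hq'']; exact List.mem_append_left _ h')⟩
            · exact absurd (by rw [hq'']; exact List.mem_append_right _ h) hxq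
        · intro fd hfd
          rcases hcov fd hfd with ⟨e, he, he2⟩ | h
          · rcases hcov' e he with ⟨e', he', he2'⟩ | h
            · exact Or.inl ⟨e', he', by rw [he2', he2]⟩
            · right
              intro y hy
              rw [← he2] at hy
              exact h y hy
          · right
            intro y hy
            rw [hc']
            exact List.mem_append_left _ (h y hy)
      have hlen' : (pvU att fds).length + 1 + r.2.2.length ≤ fuel + r.2.1.length := by
        have e1 : r.2.1.length = c.length + new.length := by rw [hc']; simp
        have e2 : r.2.2.length = q'.length + new.length := by rw [hq'']; simp
        have e3 : (q' ++ [a]).length = q'.length + 1 := by simp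
        omega
      obtain ⟨h1, h2, h3⟩ := ih r.1 r.2.1 r.2.2 hinv' hlen'
      rw [hres]
      refine ⟨?_, h2, h3⟩
      intro x hx
      exact h1 x (by rw [hc']; exact List.mem_append_left _ hx)

-- the step function of pvInitScan
def pvInStep (st : List (Int × List String × List String) × PySem.Set String × List String)
    (fd : List String × List String) : List (Int × List String × List String) × PySem.Set String × List String :=
  if fd.1.isEmpty then
    let f := pvFire st.2.1 st.2.2 fd.2
    (st.1, f.1, f.2)
  else (st.1 ++ [((fd.1.length : Int), fd.1, fd.2)], st.2.1, st.2.2)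

theorem pvInitScan_eq (fds : List (List String × List String)) (c : PySem.Set String) (q : List String) :
    pvInitScan fds c q = fds.foldl pvInStep ([], c, q) := rfl

theorem pvInit_fold (att : List String) (fds : List (List String × List String)) :
    ∀ (l : List (List String × List String)) (pend : List (Int × List String × List String)) (c : PySem.Set String),
      (∀ fd ∈ l, fd ∈ fds) →
      c.Nodup →
      (∀ e ∈ pend, e.2 ∈ fds ∧ e.1 = ((e.2.1.length : Nat) : Int) ∧ e.2.1 ≠ []) →
      (∀ x ∈ c, pvDeriv att fds x) →
      (∀ x ∈ c, x ∈ pvU att fds) →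
      (l.foldl pvInStep (pend, c, c)).2.2 = (l.foldl pvInStep (pend, c, c)).2.1 ∧
      (l.foldl pvInStep (pend, c, c)).2.1.Nodup ∧
      (∀ e ∈ (l.foldl pvInStep (pend, c, c)).1, e.2 ∈ fds ∧ e.1 = ((e.2.1.length : Nat) : Int) ∧ e.2.1 ≠ []) ∧
      (∀ x ∈ (l.foldl pvInStep (pend, c, c)).2.1, pvDeriv att fds x) ∧
      (∀ x ∈ (l.foldl pvInStep (pend, c, c)).2.1, x ∈ pvU att fds) ∧
      pend <+: (l.foldl pvInStep (pend, c, c)).1 ∧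
      c <+: (l.foldl pvInStep (pend, c, c)).2.1 ∧
      (∀ fd ∈ l, (∃ e ∈ (l.foldl pvInStep (pend, c, c)).1, e.2 = fd) ∨
        (∀ y ∈ fd.2, y ∈ (l.foldl pvInStep (pend, c, c)).2.1)) := by
  intro l
  induction l with
  | nil =>
    intro pend c _ hnd hent hder hU
    exact ⟨rfl, hnd, hent, hder, hU, List.prefix_refl _, List.prefix_refl _, by simp⟩
  | cons fd t ih =>
    intro pend c hsub hnd hent hder hU
    have hfdfds : fd ∈ fds := hsub fd List.mem_cons_self
    have hsubt : ∀ fd' ∈ t, fd' ∈ fds := fun fd' h => hsub fd' (List.mem_cons_of_mem _ h)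
    by_cases hempty : fd.1.isEmpty = true
    · have hstep : pvInStep (pend, c, c) fd = (pend, (pvFire c c fd.2).1, (pvFire c c fd.2).2) := by
        unfold pvInStep
        simp [hempty]
      obtain ⟨new, hf1, hf2, hf3, hf4, hf5⟩ := pvFire_spec fd.2 c c
      have hceq : (pvFire c c fd.2).2 = (pvFire c c fd.2).1 := by rw [hf1, hf2]
      have hder' : ∀ x ∈ (pvFire c c fd.2).1, pvDeriv att fds x := by
        intro x hx
        rw [hf1] at hx
        rcases List.mem_append.mp hx with hx | hx
        · exact hder x hx
        · refine pvDeriv.step (lhs := fd.1) (rhs := fd.2) hfdfds ?_ (hf3 x hx).1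
          intro z hz
          rw [List.isEmpty_iff.mp hempty] at hz
          simp at hz
      have hU' : ∀ x ∈ (pvFire c c fd.2).1, x ∈ pvU att fds := by
        intro x hx
        rw [hf1] at hx
        rcases List.mem_append.mp hx with hx | hx
        · exact hU x hx
        · exact pvU_mem (Or.inr ⟨fd, hfdfds, (hf3 x hx).1⟩)
      have hfold : (fd :: t).foldl pvInStep (pend, c, c) =
          t.foldl pvInStep (pend, (pvFire c c fd.2).1, (pvFire c c fd.2).1) := by
        simp only [List.foldl_cons, hstep, hceq]
      obtain ⟨k1, k2, k3, k4, k5, k6, k7, k8⟩ :=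
        ih pend (pvFire c c fd.2).1 hsubt (hf5 hnd) hent hder' hU'
      rw [hfold]
      refine ⟨k1, k2, k3, k4, k5, k6, ?_, ?_⟩
      · refine List.IsPrefix.trans ?_ k7
        rw [hf1]; exact List.prefix_append _ _
      · intro fd' hfd'
        rcases List.mem_cons.mp hfd' with rfl | hmem
        · right
          intro y hy
          exact k7.subset (hf4 y hy)
        · exact k8 fd' hmem
    · have hstep : pvInStep (pend, c, c) fd = (pend ++ [((fd.1.length : Int), fd.1, fd.2)], c, c) := by
        unfold pvInStep
        simp [hempty]
      have hent' : ∀ e ∈ pend ++ [((fd.1.length : Int), fd.1, fd.2)],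
          e.2 ∈ fds ∧ e.1 = ((e.2.1.length : Nat) : Int) ∧ e.2.1 ≠ [] := by
        intro e he
        rcases List.mem_append.mp he with he | he
        · exact hent e he
        · simp only [List.mem_singleton] at he
          subst he
          exact ⟨hfdfds, rfl, fun h => hempty (List.isEmpty_iff.mpr h)⟩
      have hfold : (fd :: t).foldl pvInStep (pend, c, c) =
          t.foldl pvInStep (pend ++ [((fd.1.length : Int), fd.1, fd.2)], c, c) := by
        simp only [List.foldl_cons, hstep]
      obtain ⟨k1, k2, k3, k4, k5, k6, k7, k8⟩ :=
        ih (pend ++ [((fd.1.length : Int), fd.1, fd.2)]) c hsubt hnd hent' hder hU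
      rw [hfold]
      refine ⟨k1, k2, k3, k4, k5, (List.prefix_append _ _).trans k6, k7, ?_⟩
      intro fd' hfd'
      rcases List.mem_cons.mp hfd' with rfl | hmem
      · exact Or.inl ⟨((fd'.1.length : Int), fd'.1, fd'.2),
          k6.subset (List.mem_append_right _ List.mem_cons_self), rfl⟩
      · exact k8 fd' hmem

theorem pvMemB (att : List String) (fds : List (List String × List String))
    (hPre : ∀ fd ∈ fds, fd.1.Nodup) :
    ∀ x, x ∈ pvClosureB att fds ↔ pvDeriv att fds x := by
  have hc0nd : (PySem.Set.ofList att).Nodup := PySem.Set.nodup_ofList att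
  obtain ⟨k1, k2, k3, k4, k5, _, k7, k8⟩ :=
    pvInit_fold att fds fds [] (PySem.Set.ofList att) (fun _ h => h) hc0nd (by simp)
      (fun x hx => pvDeriv.base ((PySem.Set.mem_ofList _ _).mp hx))
      (fun x hx => pvU_mem (Or.inl ((PySem.Set.mem_ofList _ _).mp hx)))
  set st := fds.foldl pvInStep (([] : List (Int × List String × List String)), PySem.Set.ofList att, (PySem.Set.ofList att : List String)) with hst
  have hinv : pvInv att fds st.1 st.2.1 st.2.2 := by
    refine ⟨k2, ?_, ?_, ?_, ?_, k4, k5⟩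
    · intro x hx; rw [k1] at hx; exact hx
    · rw [k1]; exact k2
    · intro e he
      obtain ⟨hefd, hlen, hne⟩ := k3 e he
      refine ⟨hefd, ?_, ?_⟩
      · rw [hlen]
        unfold pvMiss
        congr 1
        symm
        apply List.countP_eq_length.mpr
        intro x _
        simp only [Bool.not_eq_eq_eq_not, Bool.not_true, decide_eq_false_iff_not]
        intro ⟨hxc, hxq⟩
        rw [k1] at hxq
        exact hxq hxc
      · rw [hlen]
        have : 0 < e.2.1.length := List.length_pos_of_ne_nil hne
        omega
    · intro fd hfd
      exact k8 fd hfd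
  have hlen : (pvU att fds).length + 1 + st.2.2.length ≤
      ((att ++ fds.flatMap (fun fd => fd.2)).length + 1) + st.2.1.length := by
    have h1 := PySem.Set.length_ofList_le (att ++ fds.flatMap (fun fd => fd.2))
    have h2 : st.2.2.length = st.2.1.length := by rw [k1]
    unfold pvU
    omega
  obtain ⟨h1, h2, h3⟩ := pvWorklist_spec att fds hPre
    ((att ++ fds.flatMap (fun fd => fd.2)).length + 1) st.1 st.2.1 st.2.2 hinv hlen
  have hcl : pvClosureB att fds =
      pvWorklist ((att ++ fds.flatMap (fun fd => fd.2)).length + 1) st.1 st.2.1 st.2.2 := by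
    rw [hst, ← pvInitScan_eq]
    rfl
  intro x
  rw [hcl]
  constructor
  · exact h3 x
  · intro hd
    refine pvDeriv_mem ?_ h2 hd
    intro y hy
    exact h1 y (k7.subset ((PySem.Set.mem_ofList _ _).mpr hy))

-- the two closures agree on every superkey test
theorem pvSubEq (rel att : List String) (fds : List (List String × List String))
    (hatt : att.Nodup) (hPre : ∀ fd ∈ fds, fd.1.Nodup) :
    PySem.Set.issubset rel (attribute_closure att fds) = PySem.Set.issubset rel (pvClosureB att fds) := by
  apply Bool.coe_iff_coe.mp
  rw [PySem.Set.issubset_iff, PySem.Set.issubset_iff]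
  constructor <;> intro h x hx
  · exact (pvMemB att fds hPre x).mpr ((pvMemA att fds hatt x).mp (h x hx))
  · exact (pvMemA att fds hatt x).mpr ((pvMemB att fds hPre x).mp (h x hx))

-- A's break-on-first-hit loop over candidate_keys is List.any
theorem pvProperLoop_eq (lhs : List String) :
    ∀ ks : List (List String),
      pvProperLoop lhs ks = ks.any (fun k => PySem.Set.issubset lhs k && !(PySem.Set.equal lhs k)) := by
  intro ks
  induction ks with
  | nil => rfl
  | cons k t ih =>
    simp only [pvProperLoop, List.any_cons, ← ih]
    by_cases h : (PySem.Set.issubset lhs k && !(PySem.Set.equal lhs k)) = true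
    · simp [h]
    · simp only [Bool.not_eq_true] at h
      simp [h]

-- the two loop bodies agree on every FD of the list
theorem pvStepEq (rel : List String) (fds : List (List String × List String)) (cks : List (List String))
    (prime : PySem.Set String) (hnd : ∀ fd ∈ fds, fd.1.Nodup) :
    ∀ acc, ∀ fd ∈ fds, pvMainStepA rel fds cks prime acc fd = pvMainStepB rel fds cks prime acc fd := by
  intro acc fd hfd
  simp only [pvMainStepA, pvMainStepB]
  have hsub := pvSubEq rel fd.1 fds (hnd fd hfd) hnd
  rw [hsub, pvProperLoop_eq]
  by_cases h1 : PySem.Set.issubset fd.1 rel = true <;>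
    by_cases h2 : PySem.Set.issubset fd.2 rel = true <;>
    by_cases h3 : (PySem.Set.diff fd.2 fd.1).isEmpty = true <;>
    by_cases h4 : PySem.Set.issubset rel (pvClosureB fd.1 fds) = true <;>
    by_cases h5 : (PySem.Set.diff (PySem.Set.diff fd.2 fd.1) prime).isEmpty = true <;>
    by_cases h6 : cks.any (fun k => PySem.Set.issubset fd.1 k && !(PySem.Set.equal fd.1 k)) = true <;>
    simp [h1, h2, h3, h4, h5, h6]

-- ===== VERDICT (by name: the statement is the Claim_ definition above) =====
theorem determine_normal_form_spec : Claim_equal_determine_normal_form := by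
  intro rel fds cks _ hpre
  obtain ⟨hra, hfds, hck⟩ := hpre
  unfold Spec_determine_normal_form
  simp only [determine_normal_form, determine_normal_form_alt]
  rw [PySem.List.foldl_congr_mem fds _ _ ([], [], [])
    (pvStepEq rel fds cks (cks.foldl (fun s k => PySem.Set.update s k) PySem.Set.empty)
      (fun fd h => (hfds fd h).1))]
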